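-- pv_equiv track=rewrite | github.com/xianiax02/mila_coding_study | 프로그래머스/2/42626. 더 맵게/더 맵게.py | solution
-- ===== SOURCE A (Python) =====
-- import heapq
--
-- def solution(scoville, K):
--     cnt=0
--     heapq.heapify(scoville)
--     while len(scoville)>1 and scoville[0]<K:
--         ing1=heapq.heappop(scoville)
--         ing2=heapq.heappop(scoville)
--         mixed=ing1+ing2*2
--         cnt+=1
--         heapq.heappush(scoville,mixed)
--     if scoville[0]<K:
--         cnt=-1
--     answer = cnt
--     return answer
-- ===== SOURCE B (Python) =====
-- def _insert_sorted(lst, x):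
--     i = 0
--     while i < len(lst) and lst[i] < x:
--         i += 1
--     lst.insert(i, x)
--
-- def solution(scoville, K):
--     cnt = 0
--     s = sorted(scoville)
--     while len(s) > 1 and s[0] < K:
--         ing1 = s[0]
--         ing2 = s[1]
--         s = s[2:]
--         _insert_sorted(s, ing1 + ing2 * 2)
--         cnt += 1
--     if s[0] < K:
--         cnt = -1
--     return cnt
-- ===== Notes on version B (the rewrite author's own statement) =====
-- stated objective: alternative
-- what changed: Replaces the binary heap with a sorted list: sort once, take the two smallest from the front each round, and reinsert the mix at its sorted position; the heap and its sift operations disappear.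
import Mathlib
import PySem

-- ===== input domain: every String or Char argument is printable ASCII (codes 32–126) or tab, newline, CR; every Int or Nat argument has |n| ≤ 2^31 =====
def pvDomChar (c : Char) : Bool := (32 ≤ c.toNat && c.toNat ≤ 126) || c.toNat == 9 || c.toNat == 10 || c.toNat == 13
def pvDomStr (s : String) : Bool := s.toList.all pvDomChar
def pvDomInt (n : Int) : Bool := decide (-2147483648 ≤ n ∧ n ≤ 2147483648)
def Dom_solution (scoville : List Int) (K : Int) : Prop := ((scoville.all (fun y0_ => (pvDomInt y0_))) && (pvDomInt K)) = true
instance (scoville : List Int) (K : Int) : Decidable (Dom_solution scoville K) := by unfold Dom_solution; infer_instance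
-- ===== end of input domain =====

-- B replaces A's binary heap by a sorted list (sort once, take the two smallest from the
-- front, reinsert the mix at its sorted position); return-value equivalence only: A
-- heapifies its argument in place, B does not mutate it.

-- ===== PORT A =====
-- heapq.heappop/heappush are library calls, ported at the value level the returned cnt
-- depends on (exact for the return value): the heap root / heappop result is the list
-- minimum, popping removes one occurrence of it, heappush adds the element.
def aLoop (l : List Int) (K : Int) (cnt : Int) : List Int × Int :=
  if h : 1 < l.length ∧ (PySem.List.min? l (fun x => x)).getD 0 < K then
    aLoop
      (((l.erase ((PySem.List.min? l (fun x => x)).getD 0)).erase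
          ((PySem.List.min? (l.erase ((PySem.List.min? l (fun x => x)).getD 0)) (fun x => x)).getD 0))
        ++ [(PySem.List.min? l (fun x => x)).getD 0
            + (PySem.List.min? (l.erase ((PySem.List.min? l (fun x => x)).getD 0)) (fun x => x)).getD 0 * 2])
      K (cnt + 1)
  else (l, cnt)
termination_by l.length
decreasing_by
  set m1 := (PySem.List.min? l (fun x => x)).getD 0 with hm1
  set m2 := (PySem.List.min? (l.erase m1) (fun x => x)).getD 0 with hm2
  have hl : l ≠ [] := by
    intro e; subst e; simp at h
  obtain ⟨m, hm⟩ : ∃ m, PySem.List.min? l (fun x => x) = some m := by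
    cases e : PySem.List.min? l (fun x => x) with
    | none => exact absurd ((PySem.List.min?_eq_none_iff _ _).mp e) hl
    | some m => exact ⟨m, rfl⟩
  have h1 : m1 ∈ l := by
    rw [hm1, hm]; exact PySem.List.min?_mem hm
  have e1 : (l.erase m1).length = l.length - 1 := List.length_erase_of_mem h1
  have hl1 : l.erase m1 ≠ [] := by
    intro e
    have : (l.erase m1).length = 0 := by simp [e]
    omega
  obtain ⟨n2, hn2⟩ : ∃ n2, PySem.List.min? (l.erase m1) (fun x => x) = some n2 := by
    cases e : PySem.List.min? (l.erase m1) (fun x => x) with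
    | none => exact absurd ((PySem.List.min?_eq_none_iff _ _).mp e) hl1
    | some n2 => exact ⟨n2, rfl⟩
  have h2 : m2 ∈ l.erase m1 := by
    rw [hm2, hn2]; exact PySem.List.min?_mem hn2
  have e2 : ((l.erase m1).erase m2).length = (l.erase m1).length - 1 :=
    List.length_erase_of_mem h2
  simp only [List.length_append, List.length_cons, List.length_nil, e2, e1]
  omega

-- final check is Python's scoville[0] < K on the heap root (= the minimum); exact for nonempty lists (see Pre_)
def solution (scoville : List Int) (K : Int) : Int :=
  if (PySem.List.min? (aLoop scoville K 0).1 (fun x => x)).getD 0 < K then -1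
  else (aLoop scoville K 0).2

-- ===== PORT B =====
-- Source B's _insert_sorted(lst, x): scan past the elements < x, insert there = List.orderedInsert (· ≤ ·) x
def bLoop (s : List Int) (K : Int) (cnt : Int) : List Int × Int :=
  match s with
  | a :: b :: rest =>
    if a < K then
      bLoop (List.orderedInsert (· ≤ ·) (a + b * 2) rest) K (cnt + 1)
    else (a :: b :: rest, cnt)
  | s => (s, cnt)
termination_by s.length
decreasing_by
  simp [List.orderedInsert_length]

def solution_alt (scoville : List Int) (K : Int) : Int :=
  if (bLoop (PySem.List.sorted scoville (fun x => x) false) K 0).1.head?.getD 0 < K then -1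
  else (bLoop (PySem.List.sorted scoville (fun x => x) false) K 0).2

-- ===== PRECONDITION & SPEC =====
-- Pre_ excludes only the empty list, on which A raises IndexError at scoville[0] (and B raises too).
def Pre_solution (scoville : List Int) (K : Int) : Prop := scoville ≠ []
instance (scoville : List Int) (K : Int) : Decidable (Pre_solution scoville K) := by unfold Pre_solution; infer_instance
def pvWitness_solution : List Int × Int := ([1, 2, 3, 9, 10, 12], 7)
def Spec_solution (scoville : List Int) (K : Int) (out : Int) : Prop := out = solution_alt scoville K
instance (scoville : List Int) (K : Int) (out : Int) : Decidable (Spec_solution scoville K out) := by unfold Spec_solution; infer_instance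

-- ===== CLAIM (what is proved, stated in full; the proofs are below) =====
def Claim_equal_solution : Prop := ∀ (scoville : List Int) (K : Int), Dom_solution scoville K → Pre_solution scoville K → Spec_solution scoville K (solution scoville K)

-- ===== LEMMAS AND PROOFS =====

-- the minimum of any list permutation-equal to a sorted a :: t is a
theorem min?_of_perm_sorted (l : List Int) (a : Int) (t : List Int)
    (hp : l.Perm (a :: t)) (hs : (a :: t).Pairwise (· ≤ ·)) :
    PySem.List.min? l (fun x => x) = some a := by
  have hl : l ≠ [] := by
    intro e; subst e
    exact absurd hp.symm (by simp)
  obtain ⟨m, hm⟩ : ∃ m, PySem.List.min? l (fun x => x) = some m := by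
    cases e : PySem.List.min? l (fun x => x) with
    | none => exact absurd ((PySem.List.min?_eq_none_iff _ _).mp e) hl
    | some m => exact ⟨m, rfl⟩
  have hmem : m ∈ a :: t := hp.mem_iff.mp (PySem.List.min?_mem hm)
  have hma : m ≤ a := PySem.List.min?_isMin hm a (hp.mem_iff.mpr (by simp))
  have ham : a ≤ m := by
    rcases List.mem_cons.mp hmem with h | h
    · omega
    · exact (List.pairwise_cons.mp hs).1 m h
  rw [hm]
  exact congrArg some (le_antisymm hma ham)

theorem loop_eq (n : ℕ) : ∀ (l s : List Int) (K cnt : Int), l.length = n → l.Perm s →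
    s.Pairwise (· ≤ ·) →
    (aLoop l K cnt).1.Perm (bLoop s K cnt).1 ∧ (bLoop s K cnt).1.Pairwise (· ≤ ·) ∧
    (aLoop l K cnt).2 = (bLoop s K cnt).2 ∧ (s ≠ [] → (bLoop s K cnt).1 ≠ []) := by
  induction n using Nat.strong_induction_on with
  | _ n ih =>
    intro l s K cnt hn hp hs
    have hlen : l.length = s.length := hp.length_eq
    match s with
    | [] =>
      have : l = [] := List.length_eq_zero_iff.mp (by simp [hlen])
      subst this
      rw [aLoop]
      simp [bLoop]
    | [a] =>
      rw [aLoop]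
      have hc : ¬ (1 < l.length ∧ (PySem.List.min? l (fun x => x)).getD 0 < K) := by
        intro ⟨h1, _⟩; rw [hlen] at h1; simp at h1
      rw [dif_neg hc]
      simp only [bLoop]
      exact ⟨hp, hs, by trivial, by simp⟩
    | a :: b :: rest =>
      have hmin : PySem.List.min? l (fun x => x) = some a :=
        min?_of_perm_sorted l a (b :: rest) hp hs
      by_cases hK : a < K
      · -- one mixing step on each side
        have hcond : 1 < l.length ∧ (PySem.List.min? l (fun x => x)).getD 0 < K := by
          refine ⟨?_, by simp [hmin, hK]⟩
          rw [hlen]; simp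
        rw [aLoop, dif_pos hcond]
        rw [bLoop]; simp only [hK, if_pos]
        have hp1 : (l.erase a).Perm (b :: rest) := by
          have := hp.erase a
          simpa using this
        have hs1 : (b :: rest).Pairwise (· ≤ ·) := (List.pairwise_cons.mp hs).2
        have hmin1 : PySem.List.min? (l.erase a) (fun x => x) = some b :=
          min?_of_perm_sorted (l.erase a) b rest hp1 hs1
        simp only [hmin, hmin1, Option.getD_some]
        have hp2 : ((l.erase a).erase b).Perm rest := by
          have := hp1.erase b
          simpa using this
        have hpnext : (((l.erase a).erase b) ++ [a + b * 2]).Perm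
            (List.orderedInsert (· ≤ ·) (a + b * 2) rest) :=
          ((List.perm_append_singleton _ _).trans (hp2.cons _)).trans
            (List.perm_orderedInsert _ _ _).symm
        have hsnext : (List.orderedInsert (· ≤ ·) (a + b * 2) rest).Pairwise (· ≤ ·) :=
          List.Pairwise.orderedInsert _ rest (List.pairwise_cons.mp hs1).2
        have hlnext : (((l.erase a).erase b) ++ [a + b * 2]).length = n - 1 := by
          have ha : a ∈ l := hp.mem_iff.mpr (by simp)
          have hb : b ∈ l.erase a := hp1.mem_iff.mpr (by simp)
          have e1 := List.length_erase_of_mem ha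
          have e2 := List.length_erase_of_mem hb
          have h2 : 2 ≤ n := by rw [← hn, hlen]; simp
          simp only [List.length_append, List.length_cons, List.length_nil, e2, e1, hn]
          omega
        have hlt : n - 1 < n := by
          have : 2 ≤ n := by rw [← hn, hlen]; simp
          omega
        have := ih (n - 1) hlt (((l.erase a).erase b) ++ [a + b * 2])
          (List.orderedInsert (· ≤ ·) (a + b * 2) rest) K (cnt + 1) hlnext hpnext hsnext
        refine ⟨this.1, this.2.1, this.2.2.1, fun _ => ?_⟩
        refine this.2.2.2 (fun e => ?_)
        have := List.orderedInsert_length (· ≤ ·) rest (a + b * 2)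
        rw [e] at this
        simp at this
      · -- both loops stop
        have hc : ¬ (1 < l.length ∧ (PySem.List.min? l (fun x => x)).getD 0 < K) := by
          intro ⟨_, h2⟩
          rw [hmin] at h2
          simp at h2
          omega
        rw [aLoop, dif_neg hc, bLoop]
        simp only [hK, ite_false]
        exact ⟨hp, hs, by trivial, by simp⟩

-- ===== VERDICT (by name: the statement is the Claim_ definition above) =====
theorem solution_spec : Claim_equal_solution := by
  intro scoville K _ hpre
  unfold Spec_solution solution solution_alt
  have hperm : scoville.Perm (PySem.List.sorted scoville (fun x => x) false) :=
    (PySem.List.sorted_perm scoville (fun x => x) false).symm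
  have hsorted : (PySem.List.sorted scoville (fun x => x) false).Pairwise (· ≤ ·) :=
    PySem.List.sorted_pairwise scoville (fun x => x)
  obtain ⟨hP, hS, hC, hNE⟩ :=
    loop_eq scoville.length scoville (PySem.List.sorted scoville (fun x => x) false) K 0
      rfl hperm hsorted
  have hs0ne : PySem.List.sorted scoville (fun x => x) false ≠ [] := fun e =>
    hpre ((PySem.List.sorted_eq_nil_iff scoville (fun x => x) false).mp e)
  obtain ⟨a, t, he⟩ : ∃ a t,
      (bLoop (PySem.List.sorted scoville (fun x => x) false) K 0).1 = a :: t := by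
    cases e : (bLoop (PySem.List.sorted scoville (fun x => x) false) K 0).1 with
    | nil => exact absurd e (hNE hs0ne)
    | cons a t => exact ⟨a, t, rfl⟩
  have hmin : PySem.List.min? (aLoop scoville K 0).1 (fun x => x) = some a := by
    apply min?_of_perm_sorted _ a t
    · rw [← he]; exact hP
    · rw [← he]; exact hS
  rw [hmin, he, hC]
  simp
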